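-- pv_equiv track=rewrite | github.com/emiliovfx/OBJ2PMaker | files/OLD/cis_bodies2pm_working.py | _pm_i_print_order
-- ===== SOURCE A (Python) =====
-- from typing import List, Tuple, Dict, Any
-- from typing import List, Dict, Any, Tuple
-- from typing import List, Dict, Any, Tuple
--
-- def _pm_i_print_order(total_stations: int = 20) -> List[int]:
--     order = []
--     if total_stations > 0:
--         order.append(0)
--     if total_stations > 1:
--         order.append(1)
--     for i in range(10, total_stations):
--         order.append(i)
--     for i in range(2, 10):
--         if i < total_stations and i not in order:
--             order.append(i)
--     return order
-- ===== SOURCE B (Python) =====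
-- from typing import List
--
--
-- def _pm_i_print_order(total_stations: int = 20) -> List[int]:
--     # Sort the station indices by a priority key: 0,1 keep their own small keys,
--     # 10.. keep theirs, and 2..9 are pushed past everything with an offset of n.
--     return sorted(range(total_stations),
--                   key=lambda i: i if i < 2 or i >= 10 else i + total_stations)
-- ===== Notes on version B (the rewrite author's own statement) =====
-- stated objective: idiomatic
-- what changed: Replaced A's staged append loops and 'i not in order' membership scan with a single stable key-sort of range(total_stations), where the key leaves 0,1 and 10.. at their own values and offsets 2..9 by total_stations so they sort last.
import Mathlib
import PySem

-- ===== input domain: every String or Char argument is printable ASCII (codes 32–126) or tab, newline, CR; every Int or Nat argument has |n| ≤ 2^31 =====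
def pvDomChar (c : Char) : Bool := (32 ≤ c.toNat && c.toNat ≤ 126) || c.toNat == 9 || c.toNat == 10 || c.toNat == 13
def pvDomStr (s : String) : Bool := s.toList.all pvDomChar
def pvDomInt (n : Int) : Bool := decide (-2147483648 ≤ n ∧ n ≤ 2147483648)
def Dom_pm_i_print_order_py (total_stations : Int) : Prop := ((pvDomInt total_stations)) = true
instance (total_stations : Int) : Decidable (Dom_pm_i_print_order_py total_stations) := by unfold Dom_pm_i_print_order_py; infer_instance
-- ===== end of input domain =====

-- B replaces A's staged append loops and membership scan by one stable key-sort of range(n) (idiomatic; return value only).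

-- ===== PORT A =====
def pm_i_print_order_py (total_stations : Int) : List Int :=
  let order : List Int := []
  let order := if total_stations > 0 then order ++ [0] else order
  let order := if total_stations > 1 then order ++ [1] else order
  let order := (PySem.List.pyRange 10 total_stations 1).foldl (fun o i => o ++ [i]) order
  let order := (PySem.List.pyRange 2 10 1).foldl
    (fun o i => if i < total_stations ∧ i ∉ o then o ++ [i] else o) order
  order

-- ===== PORT B =====
def pm_i_print_order_py_alt (total_stations : Int) : List Int :=
  PySem.List.sorted (PySem.List.pyRange 0 total_stations 1)
    (fun i => if i < 2 ∨ i ≥ 10 then i else i + total_stations)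

-- ===== PRECONDITION & SPEC =====
def Spec_pm_i_print_order_py (total_stations : Int) (out : List Int) : Prop := out = pm_i_print_order_py_alt total_stations
instance (total_stations : Int) (out : List Int) : Decidable (Spec_pm_i_print_order_py total_stations out) := by unfold Spec_pm_i_print_order_py; infer_instance

-- ===== CLAIM (what is proved, stated in full; the proofs are below) =====
def Claim_equal_pm_i_print_order_py : Prop := ∀ (total_stations : Int), Dom_pm_i_print_order_py total_stations → Spec_pm_i_print_order_py total_stations (pm_i_print_order_py total_stations)

-- ===== LEMMAS AND PROOFS =====

-- the common closed form both ports are reduced to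
def pvTarget (n : Int) : List Int :=
  PySem.List.pyRange 0 (min n 2) 1
    ++ PySem.List.pyRange 10 n 1
    ++ PySem.List.pyRange 2 (min n 10) 1

theorem pv_foldl_app (l : List Int) (init : List Int) :
    l.foldl (fun o i => o ++ [i]) init = init ++ l := by
  induction l generalizing init with
  | nil => simp
  | cons x xs ih => simp [List.foldl, ih]

-- the guarded 2..9 loop: when every element is new and below n, it just appends the list
theorem pv_loop2 (n : Int) : ∀ (l b : List Int),
    (∀ i ∈ l, i < n) → l.Nodup → (∀ i ∈ l, i ∉ b) →
    l.foldl (fun o i => if i < n ∧ i ∉ o then o ++ [i] else o) b = b ++ l := by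
  intro l
  induction l with
  | nil => intro b _ _ _; simp
  | cons x xs ih =>
    intro b hlt hnd hnb
    have hx : x < n := hlt x (by simp)
    have hxb : x ∉ b := hnb x (by simp)
    have hnd' := List.nodup_cons.1 hnd
    rw [List.foldl_cons, if_pos ⟨hx, hxb⟩,
        ih (b ++ [x]) (fun i hi => hlt i (by simp [hi])) hnd'.2 ?_, List.append_assoc,
        List.singleton_append]
    intro i hi
    simp only [List.mem_append, List.mem_singleton]
    push Not
    exact ⟨hnb i (by simp [hi]), fun h => hnd'.1 (h ▸ hi)⟩

theorem pv_pyRange_pairwise (a b : Int) :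
    List.Pairwise (· < ·) (PySem.List.pyRange a b) := by
  rw [PySem.List.pyRange_one]
  exact (List.pairwise_lt_range).map _ (by intro x y h; omega)

theorem pv_A_eq (n : Int) : pm_i_print_order_py n = pvTarget n := by
  by_cases hle : n ≤ 10
  · by_cases h0 : n ≤ 0
    · simp [pm_i_print_order_py, pvTarget,
        PySem.List.pyRange_one_eq_nil (by omega : n ≤ 10),
        PySem.List.pyRange_one_eq_nil (by omega : min n 2 ≤ 0),
        PySem.List.pyRange_one_eq_nil (by omega : min n 10 ≤ 2),
        show PySem.List.pyRange 2 10 1 = [2,3,4,5,6,7,8,9] from by decide,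
        show ¬ n > 0 from by omega, show ¬ n > 1 from by omega,
        List.foldl, show ¬ (2 < n) from by omega, show ¬ (3 < n) from by omega,
        show ¬ (4 < n) from by omega, show ¬ (5 < n) from by omega,
        show ¬ (6 < n) from by omega, show ¬ (7 < n) from by omega,
        show ¬ (8 < n) from by omega, show ¬ (9 < n) from by omega]
    · have h1 : 1 ≤ n := by omega
      interval_cases n <;> decide
  · have hnotin : ∀ i : Int, i < 10 → i ∉ PySem.List.pyRange 10 n 1 := by
      intro i hi hmem
      exact absurd (PySem.List.mem_pyRange_one.1 hmem).1 (by omega)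
    simp only [pm_i_print_order_py, pvTarget]
    rw [if_pos (by omega : n > 0), if_pos (by omega : n > 1), pv_foldl_app,
        show PySem.List.pyRange 2 10 1 = [2,3,4,5,6,7,8,9] from by decide,
        pv_loop2 n [2,3,4,5,6,7,8,9] _ (by intro i hi; fin_cases hi <;> omega)
          (by decide) ?_,
        show min n 2 = 2 from by omega, show min n 10 = 10 from by omega,
        show PySem.List.pyRange 0 2 1 = [0,1] from by decide,
        show PySem.List.pyRange 2 10 1 = [2,3,4,5,6,7,8,9] from by decide]
    · simp
    · intro i hi
      have hib : (2:Int) ≤ i ∧ i < 10 := by fin_cases hi <;> exact ⟨by decide, by decide⟩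
      intro hmem
      simp only [List.nil_append, List.mem_append, List.mem_cons,
        List.not_mem_nil, or_false] at hmem
      rcases hmem with (h | h) | h
      · omega
      · omega
      · exact hnotin i (by omega) h

theorem pv_B_eq (n : Int) : pm_i_print_order_py_alt n = pvTarget n := by
  by_cases hle : n ≤ 10
  · by_cases h0 : n ≤ 0
    · simp [pm_i_print_order_py_alt, pvTarget,
        PySem.List.pyRange_one_eq_nil (by omega : n ≤ 0),
        PySem.List.pyRange_one_eq_nil (by omega : n ≤ 10),
        PySem.List.pyRange_one_eq_nil (by omega : min n 2 ≤ 0),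
        PySem.List.pyRange_one_eq_nil (by omega : min n 10 ≤ 2)]
      exact (PySem.List.sorted_eq_nil_iff _ _ _).2 rfl
    · have h1 : 1 ≤ n := by omega
      interval_cases n <;> decide
  · -- n > 10: name the sorted order via a strictly key-increasing permutation
    have hmin2 : min n 2 = 2 := by omega
    have hmin10 : min n 10 = 10 := by omega
    apply PySem.List.sorted_eq_of_perm_of_pairwise_lt
    · -- pvTarget n is a permutation of range(0, n)
      rw [pvTarget, hmin2, hmin10,
          PySem.List.pyRange_one_append 0 2 n (by omega) (by omega),
          PySem.List.pyRange_one_append 2 10 n (by omega) (by omega),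
          List.append_assoc]
      exact ((List.perm_append_comm).append_left (PySem.List.pyRange 0 2)).symm
    · -- and its keys are strictly increasing
      have k01 : ∀ i ∈ PySem.List.pyRange 0 (min n 2) 1,
          (if i < 2 ∨ i ≥ 10 then i else i + n) = i := by
        intro i hi
        have := PySem.List.mem_pyRange_one.1 hi
        rw [if_pos (by omega)]
      have kR : ∀ i ∈ PySem.List.pyRange 10 n 1,
          (if i < 2 ∨ i ≥ 10 then i else i + n) = i := by
        intro i hi
        have := PySem.List.mem_pyRange_one.1 hi
        rw [if_pos (by omega)]
      have kM : ∀ i ∈ PySem.List.pyRange 2 (min n 10) 1,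
          (if i < 2 ∨ i ≥ 10 then i else i + n) = i + n := by
        intro i hi
        have := PySem.List.mem_pyRange_one.1 hi
        rw [if_neg (by omega)]
      rw [pvTarget]
      have pwA : List.Pairwise (fun a b => (if a < 2 ∨ a ≥ 10 then a else a + n) < if b < 2 ∨ b ≥ 10 then b else b + n) (PySem.List.pyRange 0 (min n 2) 1) :=
        (pv_pyRange_pairwise 0 (min n 2)).imp_of_mem (fun ha hb h => by
          rw [k01 _ ha, k01 _ hb]; exact h)
      have pwB : List.Pairwise (fun a b => (if a < 2 ∨ a ≥ 10 then a else a + n) < if b < 2 ∨ b ≥ 10 then b else b + n) (PySem.List.pyRange 10 n 1) :=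
        (pv_pyRange_pairwise 10 n).imp_of_mem (fun ha hb h => by
          rw [kR _ ha, kR _ hb]; exact h)
      have pwC : List.Pairwise (fun a b => (if a < 2 ∨ a ≥ 10 then a else a + n) < if b < 2 ∨ b ≥ 10 then b else b + n) (PySem.List.pyRange 2 (min n 10) 1) :=
        (pv_pyRange_pairwise 2 (min n 10)).imp_of_mem (fun ha hb h => by
          rw [kM _ ha, kM _ hb]; omega)
      have crossAB : ∀ a ∈ PySem.List.pyRange 0 (min n 2) 1, ∀ b ∈ PySem.List.pyRange 10 n 1,
          (if a < 2 ∨ a ≥ 10 then a else a + n) < if b < 2 ∨ b ≥ 10 then b else b + n := by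
        intro a ha b hb
        have ha01 := PySem.List.mem_pyRange_one.1 ha
        have hbR := PySem.List.mem_pyRange_one.1 hb
        rw [k01 _ ha, kR _ hb]; omega
      have crossABC : ∀ a ∈ PySem.List.pyRange 0 (min n 2) 1 ++ PySem.List.pyRange 10 n 1,
          ∀ b ∈ PySem.List.pyRange 2 (min n 10) 1,
          (if a < 2 ∨ a ≥ 10 then a else a + n) < if b < 2 ∨ b ≥ 10 then b else b + n := by
        intro a ha b hb
        have hbM := PySem.List.mem_pyRange_one.1 hb
        rw [kM _ hb]
        rcases List.mem_append.1 ha with ha01 | haR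
        · have := PySem.List.mem_pyRange_one.1 ha01
          rw [k01 _ ha01]; omega
        · have := PySem.List.mem_pyRange_one.1 haR
          rw [kR _ haR]; omega
      exact List.pairwise_append.2 ⟨List.pairwise_append.2 ⟨pwA, pwB, crossAB⟩, pwC, crossABC⟩

-- ===== VERDICT (by name: the statement is the Claim_ definition above) =====
theorem pm_i_print_order_py_spec : Claim_equal_pm_i_print_order_py := by
  intro n _
  show pm_i_print_order_py n = pm_i_print_order_py_alt n
  rw [pv_A_eq, pv_B_eq]
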